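-- pv_equiv track=rewrite | github.com/saisantoshchirag/leetcode_python_problems | that_is_my_score.py | func
-- ===== SOURCE A (Python) =====
-- def func(k):
--     out = {}
--     for i in range(len(k)):
--         if k[i][0] not in out:
--             out[k[i][0]] = k[i][1]
--         else:
--             if out[k[i][0]] < k[i][1]:
--                 out[k[i][0]] = k[i][1]
--     n = 0
--     for i in out:
--         if i <= 8:
--             n+=out[i]
--     return n
-- ===== SOURCE B (Python) =====
-- def func(k):
--     keys = []
--     for x, _ in k:
--         if x not in keys:
--             keys.append(x)
--     return sum(max(v for y, v in k if y == x) for x in keys if x <= 8)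
-- ===== Notes on version B (the rewrite author's own statement) =====
-- stated objective: alternative
-- what changed: Replaces the dict-based single-pass max aggregation with a distinct-key list followed by a per-key max-comprehension rescan, summed directly for keys <= 8.
import Mathlib
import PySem

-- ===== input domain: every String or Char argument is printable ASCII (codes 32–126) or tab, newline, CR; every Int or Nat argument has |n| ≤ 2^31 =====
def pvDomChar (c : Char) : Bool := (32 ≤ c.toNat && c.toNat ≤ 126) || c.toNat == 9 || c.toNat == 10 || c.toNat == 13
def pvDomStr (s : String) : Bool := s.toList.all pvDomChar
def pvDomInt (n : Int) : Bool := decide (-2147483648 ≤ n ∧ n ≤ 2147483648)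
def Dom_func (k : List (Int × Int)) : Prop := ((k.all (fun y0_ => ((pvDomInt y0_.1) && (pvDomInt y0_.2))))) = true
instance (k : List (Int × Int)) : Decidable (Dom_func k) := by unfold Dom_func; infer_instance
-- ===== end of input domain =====

-- B replaces A's single-pass dict-of-maxes with a distinct-key list plus a per-key max rescan (alternative decomposition, same results).

-- ===== PORT A =====
-- body of A's first loop (one dict-update step), named so the lemmas can speak about it
def aStep (d : PySem.Dict Int Int) (p : Int × Int) : PySem.Dict Int Int :=
  if d.contains p.1 = false then d.insert p.1 p.2
  else if d.getD p.1 0 < p.2 then d.insert p.1 p.2 else d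

def func (k : List (Int × Int)) : Int :=
  let out : PySem.Dict Int Int :=
    (PySem.List.pyRange 0 (PySem.List.len k) 1).foldl
      (fun d i => aStep d (PySem.List.pyGetD k i (0, 0))) PySem.Dict.empty
  out.keys.foldl (fun n i => if i ≤ 8 then n + out.getD i 0 else n) 0

-- ===== PORT B =====
-- max(v for y, v in k if y == x); only called with x a first component of k, so the
-- filtered list is nonempty and the [] case (where Python's max would raise) is unreachable
def bMaxFor (k : List (Int × Int)) (x : Int) : Int :=
  match ((k.filter (fun p => p.1 == x)).map Prod.snd) with
  | [] => 0
  | v :: vs => vs.foldl (fun a b => if a < b then b else a) v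

def func_alt (k : List (Int × Int)) : Int :=
  let keys : PySem.Set Int := k.foldl (fun s p => PySem.Set.add s p.1) PySem.Set.empty
  keys.foldl (fun t x => if x ≤ 8 then t + bMaxFor k x else t) 0

-- ===== PRECONDITION & SPEC =====
def Spec_func (k : List (Int × Int)) (out : Int) : Prop := out = func_alt k
instance (k : List (Int × Int)) (out : Int) : Decidable (Spec_func k out) := by unfold Spec_func; infer_instance

-- ===== CLAIM (what is proved, stated in full; the proofs are below) =====
def Claim_equal_func : Prop := ∀ (k : List (Int × Int)), Dom_func k → Spec_func k (func k)

-- ===== LEMMAS AND PROOFS =====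

theorem keys_aStep (d : PySem.Dict Int Int) (p : Int × Int) :
    (aStep d p).keys = PySem.Set.add d.keys p.1 := by
  unfold aStep
  by_cases hc : d.contains p.1 = false
  · rw [if_pos hc, PySem.Dict.keys_insert_of_not_contains _ _ hc,
      PySem.Set.add_of_not_mem]
    intro hm
    exact absurd ((PySem.Dict.contains_iff_mem_keys d p.1).mpr hm) (by simp [hc])
  · have hc' : d.contains p.1 = true := by simpa using hc
    have hmem : p.1 ∈ d.keys := (PySem.Dict.contains_iff_mem_keys d p.1).mp hc'
    rw [if_neg hc, PySem.Set.add_of_mem hmem]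
    split_ifs with h
    · exact PySem.Dict.keys_insert_of_contains _ _ hc'
    · rfl

theorem keys_foldl_aStep (l : List (Int × Int)) (d : PySem.Dict Int Int) :
    (l.foldl aStep d).keys = PySem.Set.update d.keys (l.map Prod.fst) := by
  induction l generalizing d with
  | nil => simp [PySem.Set.update_nil]
  | cons p l ih =>
    simp only [List.foldl_cons, List.map_cons, PySem.Set.update_cons, ih, keys_aStep]

-- one Python-max merge step on an optional running value
def mStep (o : Option Int) (v : Int) : Option Int :=
  some (match o with | none => v | some w => if w < v then v else w)

theorem get?_aStep (d : PySem.Dict Int Int) (p : Int × Int) (x : Int) :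
    (aStep d p).get? x = if p.1 = x then mStep (d.get? x) p.2 else d.get? x := by
  unfold aStep
  by_cases hx : p.1 = x
  · subst hx
    rw [if_pos rfl]
    by_cases hc : d.contains p.1 = false
    · have h0 : d.get? p.1 = none := by
        rw [PySem.Dict.get?_eq_none_iff_contains]; exact hc
      simp [hc, h0, mStep, PySem.Dict.get?_insert_self]
    · have hc' : d.contains p.1 = true := by simpa using hc
      have hs : (d.get? p.1).isSome := by
        rw [← PySem.Dict.contains_eq_isSome_get?]; exact hc'
      obtain ⟨w, hw⟩ := Option.isSome_iff_exists.mp hs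
      have hgd : d.getD p.1 0 = w := PySem.Dict.getD_of_get?_eq_some _ 0 hw
      rw [if_neg hc, hgd]
      split_ifs with h
      · rw [PySem.Dict.get?_insert_self, hw]
        simp [mStep, h]
      · rw [hw]
        simp [mStep, h]
  · split_ifs with h1 h2 <;>
      simp [PySem.Dict.get?_insert_of_ne _ _ (Ne.symm hx)]

theorem get?_foldl_aStep (l : List (Int × Int)) (d : PySem.Dict Int Int) (x : Int) :
    (l.foldl aStep d).get? x =
      ((l.filter (fun p => p.1 == x)).map Prod.snd).foldl mStep (d.get? x) := by
  induction l generalizing d with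
  | nil => rfl
  | cons p l ih =>
    by_cases hx : p.1 = x
    · simp [List.foldl_cons, ih, get?_aStep, hx]
    · simp [List.foldl_cons, ih, get?_aStep, hx]

theorem mStep_foldl_some (vs : List Int) (w : Int) :
    vs.foldl mStep (some w) = some (vs.foldl (fun a b => if a < b then b else a) w) := by
  induction vs generalizing w with
  | nil => rfl
  | cons v vs ih => simp [List.foldl_cons, mStep, ih]

theorem getD_out_eq_bMax (k : List (Int × Int)) (x : Int)
    (hx : x ∈ PySem.Set.ofList (k.map Prod.fst)) :
    (k.foldl aStep PySem.Dict.empty).getD x 0 = bMaxFor k x := by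
  have hmem : x ∈ k.map Prod.fst := (PySem.Set.mem_ofList _ _).mp hx
  have hg := get?_foldl_aStep k PySem.Dict.empty x
  rw [PySem.Dict.get?_empty] at hg
  obtain ⟨p, hp, hpx⟩ := List.mem_map.mp hmem
  have hne : (k.filter (fun p => p.1 == x)).map Prod.snd ≠ [] := by
    simp only [ne_eq, List.map_eq_nil_iff, List.filter_eq_nil_iff]
    intro hall
    exact hall p hp (by simp [hpx])
  unfold bMaxFor
  cases hvs : (k.filter (fun p => p.1 == x)).map Prod.snd with
  | nil => exact absurd hvs hne
  | cons v vs =>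
    rw [hvs] at hg
    rw [List.foldl_cons] at hg
    have : mStep none v = some v := rfl
    rw [this, mStep_foldl_some] at hg
    exact PySem.Dict.getD_of_get?_eq_some _ 0 hg

-- ===== VERDICT (by name: the statement is the Claim_ definition above) =====
theorem func_spec : Claim_equal_func := by
  intro k _
  show func k = func_alt k
  have hkeys : (k.foldl aStep PySem.Dict.empty).keys
      = PySem.Set.ofList (k.map Prod.fst) := by
    rw [keys_foldl_aStep, PySem.Dict.keys_empty]
    exact PySem.Set.update_nil_left _
  have hkeysB : k.foldl (fun s p => PySem.Set.add s p.1) PySem.Set.empty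
      = PySem.Set.ofList (k.map Prod.fst) := by
    rw [← PySem.Set.update_map_eq_foldl_add]
    exact PySem.Set.update_nil_left _
  unfold func func_alt
  simp only [PySem.List.foldl_pyRange_zero_pyGetD, hkeys, hkeysB]
  exact PySem.List.foldl_congr_mem _ _ _ _
    (fun acc x hx => by rw [getD_out_eq_bMax k x hx])
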